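-- pv_equiv track=rewrite | github.com/BenBrooke450/Python | Python Practice/Leetcode/2367. Number of Arithmetic Triplets.py | triple
-- ===== SOURCE A (Python) =====
-- def triple(list1:list[int] , n : int):
--
--     list2 = []
--     m = 0
--
--     for nums in list1:
--         for nums2 in list1:
--             if nums2 < nums and (nums - nums2 == n):
--                 list2.append(nums2)
--             elif nums2 > nums and (nums2 - nums == n):
--                 list2.append(nums2)
--
--         if len(list2) == 2:
--             m = m + 1
--             list2 = []
--         else:
--             list2 = []
--     return m
-- ===== SOURCE B (Python) =====
-- def triple(list1: list[int], n: int):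
--     # One pass with a precomputed occurrence table instead of A's nested scans.
--     # For n <= 0 A's strict comparisons can never fire, so the count is 0.
--     if n <= 0:
--         return 0
--     cnt = {}
--     for x in list1:
--         cnt[x] = cnt.get(x, 0) + 1
--     return sum(1 for x in list1 if cnt.get(x - n, 0) + cnt.get(x + n, 0) == 2)
-- ===== Notes on version B (the rewrite author's own statement) =====
-- stated objective: faster
-- what changed: Replaces A's quadratic nested scan (building and measuring a temporary list per element) with a single pass over a counting dictionary built once, plus an explicit n<=0 early return matching A's strict comparisons.
import Mathlib
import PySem

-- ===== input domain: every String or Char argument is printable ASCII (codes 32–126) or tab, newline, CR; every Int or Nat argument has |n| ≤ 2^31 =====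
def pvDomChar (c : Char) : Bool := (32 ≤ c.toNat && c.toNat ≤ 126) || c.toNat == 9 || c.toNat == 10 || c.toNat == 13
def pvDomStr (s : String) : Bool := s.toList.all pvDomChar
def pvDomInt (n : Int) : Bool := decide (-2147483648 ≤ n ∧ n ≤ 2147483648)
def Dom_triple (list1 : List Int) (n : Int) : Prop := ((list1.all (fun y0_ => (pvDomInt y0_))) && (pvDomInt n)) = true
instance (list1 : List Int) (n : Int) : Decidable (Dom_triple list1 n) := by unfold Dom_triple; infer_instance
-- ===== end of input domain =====

-- B replaces A's quadratic nested scan by one pass over a counting dictionary (faster, asymptotic).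

-- ===== PORT A =====
def triple (list1 : List Int) (n : Int) : Int :=
  (list1.foldl
    (fun (st : Int × List Int) nums =>
      let list2 := list1.foldl
        (fun l2 nums2 =>
          if nums2 < nums ∧ nums - nums2 = n then l2 ++ [nums2]
          else if nums2 > nums ∧ nums2 - nums = n then l2 ++ [nums2]
          else l2) st.2
      if list2.length = 2 then (st.1 + 1, ([] : List Int)) else (st.1, ([] : List Int)))
    (0, [])).1

-- ===== PORT B =====
def triple_alt (list1 : List Int) (n : Int) : Int :=
  if n ≤ 0 then 0
  else
    let cnt := list1.foldl (fun d x => d.insert x (d.getD x 0 + 1)) (PySem.Dict.empty : PySem.Dict Int Int)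
    list1.foldl (fun acc x => if cnt.getD (x - n) 0 + cnt.getD (x + n) 0 = 2 then acc + 1 else acc) 0

-- ===== PRECONDITION & SPEC =====
def Spec_triple (list1 : List Int) (n : Int) (out : Int) : Prop := out = triple_alt list1 n
instance (list1 : List Int) (n : Int) (out : Int) : Decidable (Spec_triple list1 n out) := by unfold Spec_triple; infer_instance

-- ===== CLAIM (what is proved, stated in full; the proofs are below) =====
def Claim_equal_triple : Prop := ∀ (list1 : List Int) (n : Int), Dom_triple list1 n → Spec_triple list1 n (triple list1 n)

-- ===== LEMMAS AND PROOFS =====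

-- A's inner loop builds init ++ the filtered occurrences.
theorem triple_inner_eq (list1 : List Int) (n x : Int) (init : List Int) :
    list1.foldl
      (fun l2 y =>
        if y < x ∧ x - y = n then l2 ++ [y]
        else if y > x ∧ y - x = n then l2 ++ [y]
        else l2) init
      = init ++ list1.filter (fun y => decide (y < x ∧ x - y = n) || decide (y > x ∧ y - x = n)) := by
  induction list1 generalizing init with
  | nil => simp
  | cons h t ih =>
    simp only [List.foldl_cons, List.filter_cons]
    by_cases h1 : h < x ∧ x - h = n
    · simp [h1, ih]
    · by_cases h2 : h > x ∧ h - x = n <;> simp [h1, h2, ih]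

-- for a ≠ b, counting (= a ∨ = b) splits into two counts
theorem countP_or_eq (l : List Int) (a b : Int) (hab : a ≠ b) :
    l.countP (fun y => decide (y = a) || decide (y = b)) = l.count a + l.count b := by
  induction l with
  | nil => simp
  | cons h t ih =>
    simp only [List.countP_cons, List.count_cons, ih]
    by_cases h1 : h = a <;> by_cases h2 : h = b <;> simp [h1, h2, hab, Ne.symm hab] <;> omega

-- A's outer loop, with the list2 component always reset, accumulates a per-element test
theorem triple_outer_eq (list1 l : List Int) (n : Int) (m : Int) :
    (l.foldl
      (fun (st : Int × List Int) nums =>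
        let list2 := list1.foldl
          (fun l2 nums2 =>
            if nums2 < nums ∧ nums - nums2 = n then l2 ++ [nums2]
            else if nums2 > nums ∧ nums2 - nums = n then l2 ++ [nums2]
            else l2) st.2
        if list2.length = 2 then (st.1 + 1, ([] : List Int)) else (st.1, ([] : List Int)))
      (m, [])).1
    = l.foldl
        (fun acc x =>
          if (list1.countP (fun y => decide (y < x ∧ x - y = n) || decide (y > x ∧ y - x = n))) = 2
          then acc + 1 else acc) m := by
  induction l generalizing m with
  | nil => rfl
  | cons h t ih =>
    rw [List.foldl_cons, List.foldl_cons]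
    have hstep :
        (let list2 := list1.foldl
            (fun l2 nums2 =>
              if nums2 < h ∧ h - nums2 = n then l2 ++ [nums2]
              else if nums2 > h ∧ nums2 - h = n then l2 ++ [nums2]
              else l2) ((m, ([] : List Int))).2
         if list2.length = 2 then ((m, ([] : List Int)).1 + 1, ([] : List Int))
         else ((m, ([] : List Int)).1, ([] : List Int)))
        = ((if (list1.countP (fun y => decide (y < h ∧ h - y = n) || decide (y > h ∧ y - h = n))) = 2
            then m + 1 else m : Int), ([] : List Int)) := by
      simp only [triple_inner_eq, List.nil_append, ← List.countP_eq_length_filter]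
      split_ifs <;> rfl
    rw [hstep]
    exact ih _

theorem triple_spec' (list1 : List Int) (n : Int) : triple list1 n = triple_alt list1 n := by
  unfold triple triple_alt
  rw [triple_outer_eq]
  rw [PySem.Dict.foldl_insert_getD_add_one_eq_counter]
  by_cases hn : n ≤ 0
  · simp only [hn, if_true]
    have hz : ∀ x : Int, (list1.countP (fun y => decide (y < x ∧ x - y = n) || decide (y > x ∧ y - x = n))) = 0 := by
      intro x
      rw [List.countP_eq_zero]
      intro y _
      simp only [Bool.or_eq_true, decide_eq_true_eq, not_or]
      constructor <;> rintro ⟨h1, h2⟩ <;> omega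
    have hfix : ∀ (l : List Int) (m : Int),
        l.foldl (fun acc x =>
          if (list1.countP (fun y => decide (y < x ∧ x - y = n) || decide (y > x ∧ y - x = n))) = 2
          then acc + 1 else acc) m = m := by
      intro l
      induction l with
      | nil => intro m; rfl
      | cons h t ih =>
        intro m
        rw [List.foldl_cons, hz, if_neg (by omega : ¬ (0 : Nat) = 2), ih]
    exact hfix list1 0
  · simp only [hn, if_false]
    rw [Int.not_le] at hn
    congr 1
    funext acc x
    have hp : list1.countP (fun y => decide (y < x ∧ x - y = n) || decide (y > x ∧ y - x = n))
        = list1.count (x - n) + list1.count (x + n) := by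
      rw [← countP_or_eq list1 (x - n) (x + n) (by omega)]
      congr 1
      funext y
      have e1 : (y < x ∧ x - y = n) ↔ (y = x - n) := by constructor <;> intro h <;> omega
      have e2 : (y > x ∧ y - x = n) ↔ (y = x + n) := by constructor <;> intro h <;> omega
      simp [e1, e2]
    rw [hp, PySem.Dict.getD_counter, PySem.Dict.getD_counter]
    exact if_congr (by constructor <;> intro h <;> omega) rfl rfl

-- ===== VERDICT (by name: the statement is the Claim_ definition above) =====
theorem triple_spec : Claim_equal_triple := by
  intro list1 n _
  exact triple_spec' list1 n
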